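-- pv_equiv track=rewrite | github.com/gridvisi/Python_workspace | brilliant/Logic/liars-paradox.py | liars_paradox
-- ===== SOURCE A (Python) =====
-- def liars_paradox(s1,s2,s3,s4,s5,s6):
--     if s1 == True:
--         s2, s3, s4, s5,s6 = [not(i) for i in [s2, s3, s4, s5,s6]]
--
--     elif s2 == True:
--         s3, s4, s5,s6 = [not(i) for i in [s3, s4, s5,s6]]
--
--     elif s3 == True:
--         s4, s5,s6 = [not (i) for i in [s4, s5,s6]]
--
--     elif s4 == True:
--         s1, s2, s3 = [not(i) for i in [s1, s2, s3]]
--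
--     elif s5 == True:
--         s1, s2, s3,s4 = [not(i) for i in [s1, s2, s3,s4]]
--
--     elif s6 == True:
--         s1, s2, s3, s4, s5 = [not (i) for i in [s1, s2, s3, s4,s5]]
--     return s1,s2,s3,s4,s5,s6
-- ===== SOURCE B (Python) =====
-- def liars_paradox(s1, s2, s3, s4, s5, s6):
--     # Pack the six flags into a 6-bit integer (bit i = flag i+1).
--     m = 0
--     for v in (s6, s5, s4, s3, s2, s1):
--         m = (m << 1) | (1 if v == True else 0)
--     if m:
--         # Lowest set bit = first true flag.
--         p = m ^ (m & (m - 1))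
--         k = p.bit_length() - 1
--         # Flags 1-3 negate everything after them; flags 4-6 everything before.
--         mask = (1 << k) - 1 if k >= 3 else 0b111111 ^ ((1 << (k + 1)) - 1)
--         m ^= mask
--     return tuple(bool((m >> i) & 1) for i in range(6))
-- ===== Notes on version B (the rewrite author's own statement) =====
-- stated objective: alternative
-- what changed: Packs the six flags into a 6-bit integer, isolates the lowest set bit (the first true flag), computes the negation set as an arithmetic shift mask (bits below the flag for positions >=4, bits above it otherwise) and applies it with a single XOR, replacing A's six-branch if/elif cascade of tuple-unpacking negations.
import Mathlib
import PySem

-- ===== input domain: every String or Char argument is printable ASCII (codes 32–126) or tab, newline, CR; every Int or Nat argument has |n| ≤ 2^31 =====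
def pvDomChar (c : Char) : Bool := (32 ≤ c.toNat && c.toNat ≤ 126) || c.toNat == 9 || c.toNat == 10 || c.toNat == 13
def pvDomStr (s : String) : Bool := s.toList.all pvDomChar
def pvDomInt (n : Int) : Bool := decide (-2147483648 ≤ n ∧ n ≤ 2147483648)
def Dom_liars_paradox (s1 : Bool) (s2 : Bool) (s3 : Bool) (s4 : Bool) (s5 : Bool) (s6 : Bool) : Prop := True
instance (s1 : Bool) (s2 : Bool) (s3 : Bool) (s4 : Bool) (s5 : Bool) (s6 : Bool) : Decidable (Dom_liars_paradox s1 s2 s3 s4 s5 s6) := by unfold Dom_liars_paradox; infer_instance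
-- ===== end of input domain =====

-- B packs the flags into a 6-bit integer and applies the negations as one XOR mask derived from the lowest set bit (alternative algorithm; same cost).


-- ===== PORT A =====
def liars_paradox (s1 : Bool) (s2 : Bool) (s3 : Bool) (s4 : Bool) (s5 : Bool) (s6 : Bool) : Bool × Bool × Bool × Bool × Bool × Bool :=
  if s1 == true then
    (s1, !s2, !s3, !s4, !s5, !s6)
  else if s2 == true then
    (s1, s2, !s3, !s4, !s5, !s6)
  else if s3 == true then
    (s1, s2, s3, !s4, !s5, !s6)
  else if s4 == true then
    (!s1, !s2, !s3, s4, s5, s6)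
  else if s5 == true then
    (!s1, !s2, !s3, !s4, s5, s6)
  else if s6 == true then
    (!s1, !s2, !s3, !s4, !s5, s6)
  else (s1, s2, s3, s4, s5, s6)

-- ===== PORT B =====
-- B: bit-packed flags, lowest-set-bit isolation, one XOR with an arithmetic mask.
-- 'm = (m << 1) | bit' loop over (s6..s1)
def pvPack : List Bool → Nat → Nat
  | [], m => m
  | v :: vs, m => pvPack vs ((m <<< 1) ||| (if v == true then 1 else 0))

def liars_paradox_alt (s1 : Bool) (s2 : Bool) (s3 : Bool) (s4 : Bool) (s5 : Bool) (s6 : Bool) : Bool × Bool × Bool × Bool × Bool × Bool :=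
  let m := pvPack [s6, s5, s4, s3, s2, s1] 0
  let m :=
    if m ≠ 0 then
      let p := m ^^^ (m &&& (m - 1))       -- lowest set bit (m ≥ 1, so Nat subtraction is exact)
      let k := Nat.log2 p                  -- p.bit_length() - 1 for p > 0 is exactly Nat.log2 p
      let mask := if k ≥ 3 then (1 <<< k) - 1 else 63 ^^^ ((1 <<< (k + 1)) - 1)
      m ^^^ mask
    else m
  (((m >>> 0) &&& 1) == 1, ((m >>> 1) &&& 1) == 1, ((m >>> 2) &&& 1) == 1,
   ((m >>> 3) &&& 1) == 1, ((m >>> 4) &&& 1) == 1, ((m >>> 5) &&& 1) == 1)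

-- ===== PRECONDITION & SPEC =====
def Spec_liars_paradox (s1 : Bool) (s2 : Bool) (s3 : Bool) (s4 : Bool) (s5 : Bool) (s6 : Bool) (out : Bool × Bool × Bool × Bool × Bool × Bool) : Prop := out = liars_paradox_alt s1 s2 s3 s4 s5 s6
instance (s1 : Bool) (s2 : Bool) (s3 : Bool) (s4 : Bool) (s5 : Bool) (s6 : Bool) (out : Bool × Bool × Bool × Bool × Bool × Bool) : Decidable (Spec_liars_paradox s1 s2 s3 s4 s5 s6 out) := by unfold Spec_liars_paradox; infer_instance

-- ===== CLAIM (what is proved, stated in full; the proofs are below) =====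
def Claim_equal_liars_paradox : Prop := ∀ (s1 : Bool) (s2 : Bool) (s3 : Bool) (s4 : Bool) (s5 : Bool) (s6 : Bool), Dom_liars_paradox s1 s2 s3 s4 s5 s6 → Spec_liars_paradox s1 s2 s3 s4 s5 s6 (liars_paradox s1 s2 s3 s4 s5 s6)

-- ===== LEMMAS AND PROOFS =====

-- ===== VERDICT (by name: the statement is the Claim_ definition above) =====
theorem liars_paradox_spec : Claim_equal_liars_paradox := by
  unfold Claim_equal_liars_paradox; decide
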